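-- pv_equiv track=rewrite | github.com/jliljebl/flowblade | flowblade-trunk/Flowblade/shortcuts.py | is_blocked_shortcut
-- ===== SOURCE A (Python) =====
-- import collections
--
-- RESERVED_SHORTCUTS = [  ("left",[]), ("right",[]), ("up",[]), ("down",[]), ("c",["CTRL"]), ("1", []), \
--                         ("2", []), ("3", []), ("4", []), ("5", []), ("6", []), ("7", []), ("8", []), ("9", []), ("0", []), \
--                         ("delete", []), ("return", []), ("tab", []), ("c", ["CTRL"]), ("v", ["CTRL"]), ("v", ["CTRL", "ALT"]),  ("n", ["CTRL"]), \
--                         ("s", ["CTRL"]), ("q", ["CTRL"]), ("z", ["CTRL"]), ("y", ["CTRL"]), ("o", ["CTRL"]), ("f11", []), ("kp_1", []), \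
--                         ("kp_2", []), ("kp_3", []), ("kp_4", []), ("kp_5", []), ("kp_6", []), ("kp_7", []), ("kp_8", []), ("kp_9", []), ("kp_0", [])]
--
-- def is_blocked_shortcut(key_val, mods_list):
--     for reserved in RESERVED_SHORTCUTS:
--         r_key_val, r_mods_list = reserved
--         if len(r_mods_list) == 0 and key_val == r_key_val:
--             return True
--         if key_val == r_key_val:
--             if collections.Counter(mods_list) == collections.Counter(r_mods_list):
--                 return True
--
--     return False
-- ===== SOURCE B (Python) =====
-- # B: the reserved table is a compile-time constant, so it is partially evaluated away.
-- # No scan, no Counter: membership in a literal no-modifier key set, then the sorted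
-- # modifier list is compared against the only two reserved modifier signatures.
-- NO_MOD_KEYS = frozenset([
--     "left", "right", "up", "down", "1", "2", "3", "4", "5", "6", "7", "8", "9", "0",
--     "delete", "return", "tab", "f11",
--     "kp_1", "kp_2", "kp_3", "kp_4", "kp_5", "kp_6", "kp_7", "kp_8", "kp_9", "kp_0"])
-- CTRL_KEYS = frozenset(["c", "v", "n", "s", "q", "z", "y", "o"])
--
-- def is_blocked_shortcut(key_val, mods_list):
--     if key_val in NO_MOD_KEYS:
--         return True
--     s = sorted(mods_list)
--     if key_val in CTRL_KEYS and s == ["CTRL"]: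
--         return True
--     return key_val == "v" and s == ["ALT", "CTRL"]
-- ===== Notes on version B (the rewrite author's own statement) =====
-- stated objective: simpler
-- what changed: Partially evaluates the constant reserved table away: B keeps no table and no loop, just a literal frozenset of no-modifier keys plus direct comparison of the sorted modifier list against the only two reserved modifier signatures (CTRL for c/v/n/s/q/z/y/o, ALT+CTRL for v).
import Mathlib
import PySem

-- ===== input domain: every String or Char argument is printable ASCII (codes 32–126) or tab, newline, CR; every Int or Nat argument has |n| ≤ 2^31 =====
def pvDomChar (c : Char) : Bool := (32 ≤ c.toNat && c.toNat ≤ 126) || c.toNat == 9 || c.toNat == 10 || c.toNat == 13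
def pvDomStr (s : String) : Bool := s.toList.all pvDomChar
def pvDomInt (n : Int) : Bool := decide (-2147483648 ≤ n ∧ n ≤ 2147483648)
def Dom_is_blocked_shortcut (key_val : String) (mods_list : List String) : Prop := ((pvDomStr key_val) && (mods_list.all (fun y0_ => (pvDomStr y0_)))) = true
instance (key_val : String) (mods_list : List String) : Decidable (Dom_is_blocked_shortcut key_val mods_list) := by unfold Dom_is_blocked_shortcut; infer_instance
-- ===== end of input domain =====

-- B partially evaluates the constant reserved table away: no table, no loop, no Counter —
-- a literal no-modifier key set plus comparison of the sorted modifier list against the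
-- only two reserved modifier signatures; objective: simpler.

-- ===== PORT A =====
def RESERVED_SHORTCUTS : List (String × List String) :=
  [ ("left",[]), ("right",[]), ("up",[]), ("down",[]), ("c",["CTRL"]), ("1", []),
    ("2", []), ("3", []), ("4", []), ("5", []), ("6", []), ("7", []), ("8", []), ("9", []), ("0", []),
    ("delete", []), ("return", []), ("tab", []), ("c", ["CTRL"]), ("v", ["CTRL"]), ("v", ["CTRL", "ALT"]), ("n", ["CTRL"]),
    ("s", ["CTRL"]), ("q", ["CTRL"]), ("z", ["CTRL"]), ("y", ["CTRL"]), ("o", ["CTRL"]), ("f11", []), ("kp_1", []),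
    ("kp_2", []), ("kp_3", []), ("kp_4", []), ("kp_5", []), ("kp_6", []), ("kp_7", []), ("kp_8", []), ("kp_9", []), ("kp_0", []) ]

-- collections.Counter(a) == collections.Counter(b): Python dict equality ignores order,
-- so compare keys as a set and the count at each key (exact: Counter counts are never 0 here).
def counterEq (a b : List String) : Bool :=
  let ca := PySem.Dict.counter a
  let cb := PySem.Dict.counter b
  PySem.Set.equal ca.keys cb.keys && ca.keys.all (fun k => ca.getD k 0 == cb.getD k 0)

def isBlockedLoop (key_val : String) (mods_list : List String) : List (String × List String) → Bool
  | [] => false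
  | r :: rest =>
    if r.2.length == 0 && key_val == r.1 then true
    else if key_val == r.1 then
      if counterEq mods_list r.2 then true
      else isBlockedLoop key_val mods_list rest
    else isBlockedLoop key_val mods_list rest

def is_blocked_shortcut (key_val : String) (mods_list : List String) : Bool :=
  isBlockedLoop key_val mods_list RESERVED_SHORTCUTS

-- ===== PORT B =====
def NO_MOD_KEYS : PySem.Set String :=
  PySem.Set.ofList
    [ "left", "right", "up", "down", "1", "2", "3", "4", "5", "6", "7", "8", "9", "0",
      "delete", "return", "tab", "f11",
      "kp_1", "kp_2", "kp_3", "kp_4", "kp_5", "kp_6", "kp_7", "kp_8", "kp_9", "kp_0" ]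

def CTRL_KEYS : PySem.Set String :=
  PySem.Set.ofList ["c", "v", "n", "s", "q", "z", "y", "o"]

def is_blocked_shortcut_alt (key_val : String) (mods_list : List String) : Bool :=
  if NO_MOD_KEYS.contains key_val then true
  else
    let s := PySem.List.sorted mods_list (fun x => x) false
    if CTRL_KEYS.contains key_val && s == ["CTRL"] then true
    else key_val == "v" && s == ["ALT", "CTRL"]

-- ===== PRECONDITION & SPEC =====
def Spec_is_blocked_shortcut (key_val : String) (mods_list : List String) (out : Bool) : Prop := out = is_blocked_shortcut_alt key_val mods_list
instance (key_val : String) (mods_list : List String) (out : Bool) : Decidable (Spec_is_blocked_shortcut key_val mods_list out) := by unfold Spec_is_blocked_shortcut; infer_instance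

-- ===== CLAIM (what is proved, stated in full; the proofs are below) =====
def Claim_equal_is_blocked_shortcut : Prop := ∀ (key_val : String) (mods_list : List String), Dom_is_blocked_shortcut key_val mods_list → Spec_is_blocked_shortcut key_val mods_list (is_blocked_shortcut key_val mods_list)

-- ===== LEMMAS AND PROOFS =====

theorem counterEq_iff_perm (a b : List String) : counterEq a b = true ↔ a.Perm b := by
  unfold counterEq
  simp only [Bool.and_eq_true, PySem.Set.equal_iff, List.all_eq_true, beq_iff_eq,
    PySem.Dict.getD_counter, PySem.Dict.keys_counter, PySem.Set.mem_ofList]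
  constructor
  · rintro ⟨hmem, hcnt⟩
    rw [List.perm_iff_count]
    intro x
    by_cases hx : x ∈ a
    · exact_mod_cast hcnt x hx
    · have hxb : x ∉ b := fun hb => hx ((hmem x).2 hb)
      simp [List.count_eq_zero_of_not_mem hx, List.count_eq_zero_of_not_mem hxb]
  · intro hp
    refine ⟨fun x => ⟨fun h => hp.mem_iff.1 h, fun h => hp.mem_iff.2 h⟩,
      fun x _ => by exact_mod_cast hp.count_eq x⟩

-- Counter equality = sorted-list equality (both compare the multiset of modifiers).
theorem counterEq_eq_sorted (a b : List String) :
    counterEq a b = (PySem.List.sorted a (fun x => x) false == PySem.List.sorted b (fun x => x) false) := by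
  rw [Bool.eq_iff_iff, beq_iff_eq, counterEq_iff_perm]
  exact (PySem.List.sorted_id_eq_sorted_id_iff_perm a b).symm

theorem sorted_ctrl_alt : PySem.List.sorted ["CTRL", "ALT"] (fun x => x) false = ["ALT", "CTRL"] := by
  simp [PySem.List.sorted, PySem.List.insertBy]; decide

theorem isBlockedLoop_eq_any (key_val : String) (mods_list : List String)
    (rs : List (String × List String)) :
    isBlockedLoop key_val mods_list rs
      = rs.any (fun r => key_val == r.1 && (r.2.isEmpty || counterEq mods_list r.2)) := by
  induction rs with
  | nil => rfl
  | cons r rest ih =>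
    simp only [isBlockedLoop, List.any_cons]
    by_cases h1 : r.2.length = 0
    · have he : r.2.isEmpty = true := by
        cases hr : r.2 <;> simp_all
      by_cases h2 : key_val = r.1
      · subst h2; simp [h1, he]
      · simp [h1, h2, he, ih]
    · have he : r.2.isEmpty = false := by
        cases hr : r.2 <;> simp_all
      by_cases h2 : key_val = r.1
      · subst h2
        by_cases h3 : counterEq mods_list r.2 = true <;> simp [h1, h3, he, ih]
      · simp [h1, h2, he, ih]

theorem sorted_ctrl : PySem.List.sorted ["CTRL"] (fun x => x) false = ["CTRL"] := rfl

theorem hNM_eval : NO_MOD_KEYS = [ "left", "right", "up", "down", "1", "2", "3", "4", "5", "6", "7", "8", "9", "0",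
    "delete", "return", "tab", "f11",
    "kp_1", "kp_2", "kp_3", "kp_4", "kp_5", "kp_6", "kp_7", "kp_8", "kp_9", "kp_0" ] := by decide

theorem hCK_eval : CTRL_KEYS = ["c", "v", "n", "s", "q", "z", "y", "o"] := by decide

def ALL_KEYS : List String :=
  [ "left", "right", "up", "down", "1", "2", "3", "4", "5", "6", "7", "8", "9", "0",
    "delete", "return", "tab", "f11",
    "kp_1", "kp_2", "kp_3", "kp_4", "kp_5", "kp_6", "kp_7", "kp_8", "kp_9", "kp_0",
    "c", "v", "n", "s", "q", "z", "y", "o" ]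

-- ===== VERDICT (by name: the statement is the Claim_ definition above) =====
set_option maxHeartbeats 2000000 in
theorem is_blocked_shortcut_spec : Claim_equal_is_blocked_shortcut := by
  intro key_val mods_list _
  show is_blocked_shortcut key_val mods_list = is_blocked_shortcut_alt key_val mods_list
  unfold is_blocked_shortcut is_blocked_shortcut_alt
  rw [isBlockedLoop_eq_any]
  simp only [RESERVED_SHORTCUTS, List.any_cons, List.any_nil, counterEq_eq_sorted, sorted_ctrl_alt]
  generalize PySem.List.sorted mods_list (fun x => x) false = s
  by_cases hk : key_val ∈ ALL_KEYS
  · fin_cases hk <;> (simp [hNM_eval, hCK_eval, sorted_ctrl]; try (rw [Bool.eq_iff_iff]; simp))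
  · simp only [ALL_KEYS, List.mem_cons, List.not_mem_nil, or_false, not_or] at hk
    rw [Bool.eq_iff_iff]
    simp [hNM_eval, hCK_eval, sorted_ctrl, hk]
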